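-- pv_equiv track=rewrite | github.com/JacopoDapueto/transfer_disentanglement | configs/hyperparameters.py | zipit
-- ===== SOURCE A (Python) =====
-- def zipit(list_of_items):
--     """Zips different hyperparameter settings."""
--     if len(list_of_items) == 1:
--         return list_of_items[0]
--     main_items = list_of_items[0]
--     other_items = zipit(list_of_items[1:])
--     if len(main_items) != len(other_items):
--         if len(main_items) == 1:
--             main_items *= len(other_items)
--         elif len(other_items) == 1:
--             other_items *= len(main_items)
--         else:
--             raise ValueError("Cannot zip lists of different lengths.")
--
--     result = []
--     for main_dict, other_dict in zip(main_items, other_items):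
--         new_dict = {}
--         new_dict.update(main_dict)
--         new_dict.update(other_dict)
--         result.append(new_dict)
--     return result
-- ===== SOURCE B (Python) =====
-- def zipit(list_of_items):
--     """Zips different hyperparameter settings."""
--     if len(list_of_items) == 1:
--         return list_of_items[0]
--     n = 1
--     for items in list_of_items:
--         if len(items) != 1:
--             if n != 1 and len(items) != n:
--                 raise ValueError("Cannot zip lists of different lengths.")
--             n = len(items)
--     result = []
--     for i in range(n):
--         row = {}
--         for items in list_of_items:
--             row.update(items[0] if len(items) == 1 else items[i])
--         result.append(row)
--     return result
-- ===== Notes on version B (the rewrite author's own statement) =====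
-- stated objective: faster
-- what changed: B replaces A's right-to-left recursion with per-level re-merging (each level copies every partially merged dict again) by a single scan that determines the broadcast length and then builds each output row once, updating one fresh dict per row in place.
import Mathlib
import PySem

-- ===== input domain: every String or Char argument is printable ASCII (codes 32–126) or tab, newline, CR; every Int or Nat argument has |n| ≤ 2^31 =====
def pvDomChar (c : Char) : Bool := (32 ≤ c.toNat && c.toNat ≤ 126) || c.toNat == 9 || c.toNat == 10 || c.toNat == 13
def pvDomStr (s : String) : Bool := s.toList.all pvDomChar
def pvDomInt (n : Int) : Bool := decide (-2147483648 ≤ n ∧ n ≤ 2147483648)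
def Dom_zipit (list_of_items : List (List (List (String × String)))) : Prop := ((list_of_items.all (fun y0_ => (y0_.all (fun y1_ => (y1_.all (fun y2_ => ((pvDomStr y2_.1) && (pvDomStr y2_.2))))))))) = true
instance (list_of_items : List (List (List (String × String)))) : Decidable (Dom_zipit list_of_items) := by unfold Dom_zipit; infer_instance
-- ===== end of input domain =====

-- B replaces A's right-to-left recursion (which re-copies every partial merged dict at each of the
-- k-1 recursion levels) by one pass computing the broadcast length and then building each output row
-- once, updating a single fresh dict per row.  Equivalence is about the RETURN value only: A's
-- `main_items *= len(other_items)` mutates the first inner list in place when broadcasting; B never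
-- mutates its argument.

-- ===== PORT A =====
-- new_dict = {}; new_dict.update(main_dict); new_dict.update(other_dict)
def pvDictMerge (a b : List (String × String)) : List (String × String) :=
  ((PySem.Dict.empty.update a).update b).items

-- the body of A after the recursive call: broadcasting (list *= n) then the zip loop;
-- the `raise ValueError` branch (both lengths ≠ 1 and different) is excluded by Pre_ and yields ([], []) junk here
def pvMerge (main other : List (List (String × String))) : List (List (String × String)) :=
  let p :=
    if main.length ≠ other.length then
      if main.length = 1 then ((List.replicate other.length main).flatten, other)
      else if other.length = 1 then (main, (List.replicate main.length other).flatten)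
      else ([], [])
    else (main, other)
  (p.1.zip p.2).foldl (fun result md => result ++ [pvDictMerge md.1 md.2]) []

def zipit (list_of_items : List (List (List (String × String)))) : List (List (String × String)) :=
  match list_of_items with
  | [] => []                 -- list_of_items[0] raises IndexError here; excluded by Pre_
  | x :: rest =>
    if rest = [] then x      -- len(list_of_items) == 1
    else pvMerge x (zipit rest)

-- ===== PORT B =====
-- n = 1; for items: if len(items) != 1: n = len(items)   (the ValueError check only fires outside Pre_)
def pvStep (n : Nat) (items : List (List (String × String))) : Nat :=
  if items.length ≠ 1 then items.length else n

-- items[0] if len(items) == 1 else items[i]   (getD: in range under Pre_)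
def pvPick (items : List (List (String × String))) (i : Nat) : List (String × String) :=
  if items.length = 1 then items.headD [] else items.getD i []

-- row = {}; for items in list_of_items: row.update(...)
def pvRow (list_of_items : List (List (List (String × String)))) (i : Nat) :
    PySem.Dict String String :=
  list_of_items.foldl (fun row items => row.update (pvPick items i)) PySem.Dict.empty

def zipit_alt (list_of_items : List (List (List (String × String)))) : List (List (String × String)) :=
  match list_of_items with
  | [x] => x
  | l =>
    let n := l.foldl pvStep 1
    (List.range n).map (fun i => (pvRow l i).items)

-- ===== PRECONDITION & SPEC =====
-- Pre_ excludes exactly the inputs on which A raises: the empty list (IndexError on list_of_items[0])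
-- and inputs holding two inner lists of different lengths both ≠ 1 (the explicit ValueError).
def Pre_zipit (list_of_items : List (List (List (String × String)))) : Prop :=
  list_of_items ≠ [] ∧
    ∀ a ∈ list_of_items, ∀ b ∈ list_of_items,
      a.length ≠ 1 → b.length ≠ 1 → a.length = b.length
instance (list_of_items : List (List (List (String × String)))) : Decidable (Pre_zipit list_of_items) := by
  unfold Pre_zipit; infer_instance

def pvWitness_zipit : (List (List (List (String × String)))) :=
  [[[("lr", "0.1")], [("lr", "0.2")]], [[("seed", "0")]]]

def Spec_zipit (list_of_items : List (List (List (String × String)))) (out : List (List (String × String))) : Prop := out = zipit_alt list_of_items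
instance (list_of_items : List (List (List (String × String)))) (out : List (List (String × String))) : Decidable (Spec_zipit list_of_items out) := by unfold Spec_zipit; infer_instance

-- ===== CLAIM (what is proved, stated in full; the proofs are below) =====
def Claim_equal_zipit : Prop := ∀ (list_of_items : List (List (List (String × String)))), Dom_zipit list_of_items → Pre_zipit list_of_items → Spec_zipit list_of_items (zipit list_of_items)

-- ===== LEMMAS AND PROOFS =====

-- ---- dict layer: re-updating with an already-compressed dict's items equals updating with the raw pairs ----

theorem pv_map_replace_id (l : List (String × String)) (k v : String)
    (h : k ∉ l.map Prod.fst) :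
    l.map (fun p => if p.1 == k then (k, v) else p) = l := by
  induction l with
  | nil => rfl
  | cons p t ih =>
    simp only [List.map_cons, List.mem_cons, not_or] at h
    rw [List.map_cons, ih h.2]
    have hpk : (p.1 == k) = false := by
      have : ¬ p.1 = k := fun hh => h.1 hh.symm
      simp [this]
    simp [hpk]

theorem pv_contains_mk_map (e : PySem.Dict String String) (k v j : String) :
    (PySem.Dict.mk (e.items.map (fun p => if p.1 == k then (k, v) else p))).contains j
      = e.contains j := by
  simp only [PySem.Dict.contains, List.any_map]
  induction e.items with
  | nil => rfl
  | cons p t ih =>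
    simp only [List.any_cons, ih]
    by_cases h : p.1 = k <;> simp [h]

theorem pv_insert_mk_map (e : PySem.Dict String String) (k v q1 q2 : String)
    (hq : q1 ≠ k) :
    (PySem.Dict.mk (e.items.map (fun p => if p.1 == k then (k, v) else p))).insert q1 q2
      = PySem.Dict.mk ((e.insert q1 q2).items.map (fun p => if p.1 == k then (k, v) else p)) := by
  have hcont := pv_contains_mk_map e k v q1
  cases hc : e.contains q1 with
  | true =>
    apply PySem.Dict.ext
    rw [PySem.Dict.items_insert_of_contains _ q2 (hcont.trans hc),
        PySem.Dict.items_insert_of_contains _ q2 hc]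
    simp only [List.map_map]
    apply List.map_congr_left
    intro p _
    by_cases h1 : p.1 = q1
    · have h2 : (p.1 == k) = false := by simp [h1, hq]
      simp [Function.comp, h1, hq]
    · have hkq : ¬ k = q1 := fun hh => hq hh.symm
      by_cases h2 : p.1 = k <;> simp [Function.comp, h1, h2, hkq]
  | false =>
    apply PySem.Dict.ext
    rw [PySem.Dict.items_insert_of_not_contains _ q2 (hcont.trans hc),
        PySem.Dict.items_insert_of_not_contains _ q2 hc]
    have hqk : (q1 == k) = false := by simp [hq]
    simp only [List.map_append, List.map_cons, List.map_nil, hqk]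
    simp

-- map (replace k v) commutes through an update whose keys avoid k
theorem pv_update_mk_map (k v : String) (l : List (String × String)) :
    ∀ e : PySem.Dict String String, k ∉ l.map Prod.fst →
      (PySem.Dict.mk (e.items.map (fun p => if p.1 == k then (k, v) else p))).update l
        = PySem.Dict.mk ((e.update l).items.map (fun p => if p.1 == k then (k, v) else p)) := by
  induction l with
  | nil => intro e _; rfl
  | cons q t ih =>
    intro e hk
    simp only [List.map_cons, List.mem_cons, not_or] at hk
    show ((PySem.Dict.mk (e.items.map _)).insert q.1 q.2).update t = _
    rw [pv_insert_mk_map e k v q.1 q.2 (fun hh => hk.1 hh.symm)]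
    exact ih (e.insert q.1 q.2) hk.2

theorem pv_insert_eq_mk_map (d : PySem.Dict String String) (k v : String)
    (h : d.contains k = true) :
    d.insert k v = PySem.Dict.mk (d.items.map (fun p => if p.1 == k then (k, v) else p)) := by
  apply PySem.Dict.ext
  simp [PySem.Dict.items_insert_of_contains d v h]

theorem pv_contains_update (d : PySem.Dict String String) (l : List (String × String))
    (k : String) (h : d.contains k = true) :
    (d.update l).contains k = true := by
  induction l generalizing d with
  | nil => exact h
  | cons p t ih =>
    exact ih _ (by simp [PySem.Dict.contains_insert, h])

theorem pv_insert_update_insert (d : PySem.Dict String String) (k v w : String)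
    (l : List (String × String)) (hk : k ∉ l.map Prod.fst) :
    ((d.insert k w).update l).insert k v = (d.insert k v).update l := by
  have h2 : ((d.insert k w).update l).contains k = true :=
    pv_contains_update _ l k (PySem.Dict.contains_insert_self d k w)
  rw [pv_insert_eq_mk_map _ k v h2,
      ← pv_update_mk_map k v l (d.insert k w) hk,
      ← pv_insert_eq_mk_map (d.insert k w) k v (PySem.Dict.contains_insert_self d k w),
      PySem.Dict.insert_insert_self]

theorem pv_update_map_replace (l : List (String × String)) (k v : String) :
    ∀ d : PySem.Dict String String, (l.map Prod.fst).Nodup → k ∈ l.map Prod.fst →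
    d.update (l.map (fun p => if p.1 == k then (k, v) else p)) = (d.update l).insert k v := by
  induction l with
  | nil => intro d _ hm; exact absurd hm (by simp)
  | cons p t ih =>
    intro d hnd hm
    simp only [List.map_cons, List.nodup_cons] at hnd
    rw [List.map_cons]
    by_cases hp : p.1 = k
    · have hkt : k ∉ t.map Prod.fst := hp ▸ hnd.1
      have hhead : (if (p.1 == k) = true then (k, v) else p) = (k, v) := by simp [hp]
      rw [hhead, pv_map_replace_id t k v hkt]
      show (d.insert k v).update t = ((d.insert p.1 p.2).update t).insert k v
      rw [hp] at *
      exact (pv_insert_update_insert d k v p.2 t hkt).symm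
    · have hhead : (if (p.1 == k) = true then (k, v) else p) = p := by simp [hp]
      have hm' : k ∈ t.map Prod.fst := by
        rcases List.mem_cons.mp hm with h | h
        · exact absurd h.symm hp
        · exact h
      rw [hhead]
      show (d.insert p.1 p.2).update (t.map _) = ((d.insert p.1 p.2).update t).insert k v
      exact ih (d.insert p.1 p.2) hnd.2 hm'

theorem pv_update_insert_items (d e : PySem.Dict String String) (k v : String)
    (he : e.keys.Nodup) :
    d.update ((e.insert k v).items) = (d.update e.items).insert k v := by
  cases hc : e.contains k with
  | false =>
    rw [PySem.Dict.items_insert_of_not_contains e v hc]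
    simp [PySem.Dict.update, List.foldl_append]
  | true =>
    rw [PySem.Dict.items_insert_of_contains e v hc]
    exact pv_update_map_replace e.items k v d he
      ((PySem.Dict.contains_iff_mem_keys e k).mp hc)

theorem pv_update_compress (s : List (String × String)) :
    ∀ (e d : PySem.Dict String String), e.keys.Nodup →
      d.update ((e.update s).items) = (d.update e.items).update s := by
  induction s with
  | nil => intro e d he; rfl
  | cons p t ih =>
    intro e d he
    show d.update (((e.insert p.1 p.2).update t).items) = _
    rw [ih _ d (PySem.Dict.nodup_keys_insert e p.1 p.2 he),
        pv_update_insert_items d e p.1 p.2 he]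
    rfl

theorem pv_update_row (l : List (List (List (String × String)))) (i : Nat) :
    ∀ d : PySem.Dict String String,
      d.update ((pvRow l i).items) = l.foldl (fun row items => row.update (pvPick items i)) d := by
  have aux : ∀ (l' : List (List (List (String × String)))) (e : PySem.Dict String String),
      e.keys.Nodup → ∀ d : PySem.Dict String String,
      d.update ((l'.foldl (fun row items => row.update (pvPick items i)) e).items)
        = l'.foldl (fun row items => row.update (pvPick items i)) (d.update e.items) := by
    intro l'
    induction l' with
    | nil => intro e he d; rfl
    | cons items t ih =>
      intro e he d
      show d.update ((t.foldl _ (e.update (pvPick items i))).items) = _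
      rw [ih (e.update (pvPick items i)) (PySem.Dict.nodup_keys_update e _ he) d,
          pv_update_compress (pvPick items i) e d he]
      rfl
  intro d
  exact aux l PySem.Dict.empty PySem.Dict.nodup_keys_empty d

-- ---- broadcast-length layer ----

theorem pv_foldl_step_all1 (l : List (List (List (String × String))))
    (h : ∀ a ∈ l, a.length = 1) : ∀ init, l.foldl pvStep init = init := by
  induction l with
  | nil => intro init; rfl
  | cons a t ih =>
    intro init
    have ha : a.length = 1 := h a (by simp)
    have : pvStep init a = init := by simp [pvStep, ha]
    simpa [this] using ih (fun b hb => h b (by simp [hb])) init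

theorem pv_foldl_step_eq (l : List (List (List (String × String)))) :
    ∀ a : List (List (String × String)),
    (∀ p ∈ l, ∀ q ∈ l, p.length ≠ 1 → q.length ≠ 1 → p.length = q.length) →
    a ∈ l → a.length ≠ 1 → ∀ init, l.foldl pvStep init = a.length := by
  induction l with
  | nil => intro a _ ha _ _; exact absurd ha (by simp)
  | cons c t ih =>
    intro a hc ha h1 init
    by_cases hex : ∃ b ∈ t, b.length ≠ 1
    · obtain ⟨b, hb, hb1⟩ := hex
      have hct : ∀ p ∈ t, ∀ q ∈ t, p.length ≠ 1 → q.length ≠ 1 → p.length = q.length :=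
        fun p hp q hq => hc p (by simp [hp]) q (by simp [hq])
      have := ih b hct hb hb1 (pvStep init c)
      show t.foldl pvStep (pvStep init c) = a.length
      rw [this]
      exact hc b (by simp [hb]) a ha hb1 h1
    · push_neg at hex
      have hac : a = c := by
        rcases List.mem_cons.mp ha with h | h
        · exact h
        · exact absurd (hex a h) h1
      subst hac
      show t.foldl pvStep (pvStep init a) = a.length
      rw [pv_foldl_step_all1 t hex (pvStep init a)]
      simp [pvStep, h1]

theorem pv_step_cons (x : List (List (String × String)))
    (l : List (List (List (String × String))))
    (hc : ∀ a ∈ x :: l, ∀ b ∈ x :: l, a.length ≠ 1 → b.length ≠ 1 → a.length = b.length) :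
    (x :: l).foldl pvStep 1 = pvStep (l.foldl pvStep 1) x := by
  have hct : ∀ p ∈ l, ∀ q ∈ l, p.length ≠ 1 → q.length ≠ 1 → p.length = q.length :=
    fun p hp q hq => hc p (by simp [hp]) q (by simp [hq])
  by_cases hex : ∃ b ∈ l, b.length ≠ 1
  · obtain ⟨b, hb, hb1⟩ := hex
    have hNl : l.foldl pvStep 1 = b.length := pv_foldl_step_eq l b hct hb hb1 1
    have hL : (x :: l).foldl pvStep 1 = b.length :=
      pv_foldl_step_eq (x :: l) b hc (by simp [hb]) hb1 1
    rw [hL, hNl]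
    by_cases hx : x.length = 1
    · simp [pvStep, hx]
    · have : x.length = b.length := hc x (by simp) b (by simp [hb]) hx hb1
      simp [pvStep, this]
  · push_neg at hex
    show l.foldl pvStep (pvStep 1 x) = _
    rw [pv_foldl_step_all1 l hex (pvStep 1 x), pv_foldl_step_all1 l hex 1]

-- ---- merge layer ----

theorem pv_pick_getElem (a : List (List (String × String))) (i : Nat) (h : i < a.length) :
    pvPick a i = a[i] := by
  unfold pvPick
  by_cases h1 : a.length = 1
  · have hi : i = 0 := by omega
    subst hi
    match a, h1 with
    | [x], _ => rfl
  · rw [if_neg h1]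
    exact List.getD_eq_getElem a [] h

theorem pv_merge_rows (x R : List (List (String × String)))
    (h : x.length = 1 ∨ R.length = 1 ∨ x.length = R.length) :
    pvMerge x R
      = (List.range (pvStep R.length x)).map
          (fun i => pvDictMerge (pvPick x i) (pvPick R i)) := by
  unfold pvMerge
  by_cases hlen : x.length = R.length
  · rw [if_neg (by omega)]
    show (x.zip R).foldl _ [] = _
    simp only [PySem.List.foldl_append_singleton_eq_map, List.nil_append]
    have hstep : pvStep R.length x = R.length := by
      unfold pvStep; split <;> omega
    rw [hstep]
    apply List.ext_getElem
    · simp [List.length_zip, hlen]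
    · intro i h1 h2
      simp only [List.getElem_map, List.getElem_range, List.getElem_zip]
      have hiR : i < R.length := by simp at h2; omega
      have hix : i < x.length := by omega
      rw [pv_pick_getElem x i hix, pv_pick_getElem R i hiR]
  · rcases h with hx1 | hR1 | heq
    · -- broadcast main
      rw [if_pos (by omega), if_pos hx1]
      obtain ⟨x0, hx0⟩ := List.length_eq_one_iff.mp hx1
      subst hx0
      show ((List.replicate R.length [x0]).flatten.zip R).foldl _ [] = _
      rw [List.flatten_replicate_singleton]
      simp only [PySem.List.foldl_append_singleton_eq_map, List.nil_append]
      have hstep : pvStep R.length [x0] = R.length := by simp [pvStep]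
      rw [hstep]
      apply List.ext_getElem
      · simp [List.length_zip]
      · intro i h1 h2
        simp only [List.getElem_map, List.getElem_range, List.getElem_zip]
        have hiR : i < R.length := by
          simp [List.length_zip, List.length_replicate] at h1; omega
        rw [pv_pick_getElem R i hiR]
        simp [List.getElem_replicate, pvPick]
    · -- broadcast other
      rw [if_pos (by omega), if_neg (by omega), if_pos hR1]
      obtain ⟨r0, hr0⟩ := List.length_eq_one_iff.mp hR1
      subst hr0
      show (x.zip (List.replicate x.length [r0]).flatten).foldl _ [] = _
      rw [List.flatten_replicate_singleton]
      simp only [PySem.List.foldl_append_singleton_eq_map, List.nil_append]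
      have hx1' : x.length ≠ 1 := by simp at hlen; exact hlen
      have hstep : pvStep ([r0] : List (List (String × String))).length x = x.length := by
        simp [pvStep, hx1']
      rw [hstep]
      apply List.ext_getElem
      · simp [List.length_zip]
      · intro i h1 h2
        simp only [List.getElem_map, List.getElem_range, List.getElem_zip]
        have hix : i < x.length := by
          simp [List.length_zip, List.length_replicate] at h1; omega
        rw [pv_pick_getElem x i hix]
        simp [List.getElem_replicate, pvPick]
    · exact absurd heq hlen

-- ---- main induction ----

theorem pv_zipit_rows (rest : List (List (List (String × String)))) :
    ∀ x, rest ≠ [] →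
    (∀ a ∈ x :: rest, ∀ b ∈ x :: rest, a.length ≠ 1 → b.length ≠ 1 → a.length = b.length) →
    zipit (x :: rest)
      = (List.range ((x :: rest).foldl pvStep 1)).map (fun i => (pvRow (x :: rest) i).items) := by
  induction rest with
  | nil => intro x h _; exact absurd rfl h
  | cons y t ih =>
    intro x _ hc
    have hzip : zipit (x :: y :: t) = pvMerge x (zipit (y :: t)) := by simp [zipit]
    cases t with
    | nil =>
      have hy : zipit [y] = y := by simp [zipit]
      rw [hzip, hy]
      have hside : x.length = 1 ∨ y.length = 1 ∨ x.length = y.length := by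
        by_cases hx : x.length = 1
        · exact Or.inl hx
        · by_cases hyl : y.length = 1
          · exact Or.inr (Or.inl hyl)
          · exact Or.inr (Or.inr (hc x (by simp) y (by simp) hx hyl))
      rw [pv_merge_rows x y hside]
      have hfold : ([x, y] : List (List (List (String × String)))).foldl pvStep 1
          = pvStep y.length x := by
        show pvStep (pvStep 1 x) y = pvStep y.length x
        by_cases hyl : y.length = 1
        · by_cases hx : x.length = 1 <;> simp [pvStep, hyl, hx]
        · by_cases hx : x.length = 1
          · simp [pvStep, hyl, hx]
          · have := hc x (by simp) y (by simp) hx hyl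
            simp [pvStep, hyl, this]
      rw [hfold]
      apply List.map_congr_left
      intro i _
      rfl
    | cons z u =>
      have hct : ∀ a ∈ y :: z :: u, ∀ b ∈ y :: z :: u,
          a.length ≠ 1 → b.length ≠ 1 → a.length = b.length :=
        fun a ha b hb => hc a (by simp [ha]) b (by simp [hb])
      have hR := ih y (by simp) hct
      rw [hzip, hR]
      have hRlen : ((List.range ((y :: z :: u).foldl pvStep 1)).map
          (fun i => (pvRow (y :: z :: u) i).items)).length = (y :: z :: u).foldl pvStep 1 := by
        simp
      have hside : x.length = 1 ∨
          ((List.range ((y :: z :: u).foldl pvStep 1)).map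
            (fun i => (pvRow (y :: z :: u) i).items)).length = 1 ∨
          x.length = ((List.range ((y :: z :: u).foldl pvStep 1)).map
            (fun i => (pvRow (y :: z :: u) i).items)).length := by
        rw [hRlen]
        by_cases hx : x.length = 1
        · exact Or.inl hx
        · by_cases hex : ∃ b ∈ y :: z :: u, b.length ≠ 1
          · obtain ⟨b, hb, hb1⟩ := hex
            have hm : (y :: z :: u).foldl pvStep 1 = b.length :=
              pv_foldl_step_eq _ b hct hb hb1 1
            exact Or.inr (Or.inr (by
              rw [hm]; exact hc x (by simp) b (by simp [hb]) hx hb1))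
          · push_neg at hex
            exact Or.inr (Or.inl (pv_foldl_step_all1 _ hex 1))
      rw [pv_merge_rows x _ hside]
      rw [hRlen, pv_step_cons x (y :: z :: u) hc]
      apply List.map_congr_left
      intro i hi
      rw [List.mem_range] at hi
      by_cases hm : (y :: z :: u).foldl pvStep 1 = 1
      · -- every inner list of the tail has length 1: the single row broadcasts
        have hall : ∀ b ∈ y :: z :: u, b.length = 1 := by
          intro b hb
          by_contra hb1
          have hfe := pv_foldl_step_eq (y :: z :: u) b hct hb hb1 1
          rw [hm] at hfe
          exact hb1 hfe.symm
        have hpickR : pvPick ((List.range ((y :: z :: u).foldl pvStep 1)).map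
            (fun i => (pvRow (y :: z :: u) i).items)) i = (pvRow (y :: z :: u) 0).items := by
          rw [hm]
          rfl
        rw [hpickR]
        show ((PySem.Dict.empty.update (pvPick x i)).update ((pvRow (y :: z :: u) 0).items)).items
          = (pvRow (x :: y :: z :: u) i).items
        rw [pv_update_row (y :: z :: u) 0 (PySem.Dict.empty.update (pvPick x i))]
        show ((y :: z :: u).foldl (fun row items => row.update (pvPick items 0))
            (PySem.Dict.empty.update (pvPick x i))).items
          = ((y :: z :: u).foldl (fun row items => row.update (pvPick items i))
            (PySem.Dict.empty.update (pvPick x i))).items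
        exact congrArg PySem.Dict.items
          (PySem.List.foldl_congr_mem (y :: z :: u)
            (fun row items => row.update (pvPick items 0))
            (fun row items => row.update (pvPick items i))
            (PySem.Dict.empty.update (pvPick x i))
            (fun acc items hmem => by simp [pvPick, hall items hmem]))
      · -- i indexes a genuine row of the tail
        have him : i < (y :: z :: u).foldl pvStep 1 := by
          have hstep : pvStep ((y :: z :: u).foldl pvStep 1) x
              = (y :: z :: u).foldl pvStep 1 := by
            rcases hside with hx1 | hm1 | hxm
            · simp only [pvStep]
              rw [if_neg (by omega : ¬ x.length ≠ 1)]
            · rw [hRlen] at hm1; exact absurd hm1 hm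
            · rw [hRlen] at hxm
              simp only [pvStep]
              split <;> omega
          rw [hstep] at hi
          exact hi
        have hpickR : pvPick ((List.range ((y :: z :: u).foldl pvStep 1)).map
            (fun i => (pvRow (y :: z :: u) i).items)) i = (pvRow (y :: z :: u) i).items := by
          rw [pv_pick_getElem _ i (by simpa using him)]
          simp
        rw [hpickR]
        show ((PySem.Dict.empty.update (pvPick x i)).update ((pvRow (y :: z :: u) i).items)).items
          = (pvRow (x :: y :: z :: u) i).items
        rw [pv_update_row (y :: z :: u) i (PySem.Dict.empty.update (pvPick x i))]
        rfl

-- ===== VERDICT (by name: the statement is the Claim_ definition above) =====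
theorem zipit_spec : Claim_equal_zipit := by
  intro l _dom pre
  obtain ⟨hne, hc⟩ := pre
  show zipit l = zipit_alt l
  match l with
  | [] => exact absurd rfl hne
  | [x] => rfl
  | x :: y :: t =>
    rw [pv_zipit_rows (y :: t) x (by simp) hc]
    rfl
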